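-- pv_equiv track=rewrite | github.com/AnushkaRai-1/crypt | playfair/sender_pf.py | fill_letter
-- ===== SOURCE A (Python) =====
-- def fill_letter(text):
--     res = ""
--     i = 0
--     while i < len(text):
--         res += text[i]
--         # If there's a next character and it's the same as current
--         if i + 1 < len(text):
--             if text[i] == text[i+1]:
--                 res += 'x'
--                 i += 1
--             else:
--                 res += text[i+1]
--                 i += 2
--         else:
--             i += 1
--     # If odd length after splitting duplicates, add padding
--     if len(res) % 2 != 0:
--         res += 'z'
--     return res
-- ===== SOURCE B (Python) =====
-- def fill_letter(text):
--     res = []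
--     for c in text:
--         if len(res) % 2 == 1 and res[-1] == c:
--             res.append('x')
--         res.append(c)
--     if len(res) % 2 == 1:
--         res.append('z')
--     return ''.join(res)
-- ===== Notes on version B (the rewrite author's own statement) =====
-- stated objective: faster
-- what changed: Replaces A's while-loop with variable index strides and look-ahead comparison plus repeated string concatenation by a single uniform for-loop with a parity-driven look-behind that appends to a list and joins once at the end.
import Mathlib
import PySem

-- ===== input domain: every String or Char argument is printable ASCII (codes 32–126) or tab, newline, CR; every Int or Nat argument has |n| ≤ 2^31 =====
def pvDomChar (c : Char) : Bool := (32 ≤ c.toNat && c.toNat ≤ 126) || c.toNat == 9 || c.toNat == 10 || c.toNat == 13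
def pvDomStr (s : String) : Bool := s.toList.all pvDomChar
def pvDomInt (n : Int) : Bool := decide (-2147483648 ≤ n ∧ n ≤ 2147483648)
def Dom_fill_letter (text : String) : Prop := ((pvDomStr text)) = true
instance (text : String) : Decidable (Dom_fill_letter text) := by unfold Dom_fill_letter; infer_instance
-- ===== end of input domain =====

-- B replaces A's variable-stride look-ahead loop by a uniform per-character look-behind
-- driven by output parity (objective: simpler); return values are proved equal on all inputs.

-- ===== PORT A =====
-- A's while loop: i points at a pair start; stride is 1 (duplicate, 'x' inserted) or 2.
-- Ported as recursion on the remaining characters: stride 1 keeps the duplicate as next head.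
def fillLoopA (res : List Char) : List Char → List Char
  | [] => res
  | [c] => res ++ [c]
  | c :: d :: rest =>
      if c == d then fillLoopA (res ++ [c, 'x']) (d :: rest)
      else fillLoopA (res ++ [c, d]) rest

def fill_letter (text : String) : String :=
  let res := fillLoopA [] text.toList
  String.mk (if res.length % 2 ≠ 0 then res ++ ['z'] else res)

-- ===== PORT B =====
def stepB (res : List Char) (c : Char) : List Char :=
  if res.length % 2 == 1 && res.getLast? == some c then res ++ ['x', c] else res ++ [c]

def fill_letter_alt (text : String) : String :=
  let res := text.toList.foldl stepB []
  String.mk (if res.length % 2 == 1 then res ++ ['z'] else res)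

-- ===== PRECONDITION & SPEC =====
def Spec_fill_letter (text : String) (out : String) : Prop := out = fill_letter_alt text
instance (text : String) (out : String) : Decidable (Spec_fill_letter text out) := by unfold Spec_fill_letter; infer_instance

-- ===== CLAIM (what is proved, stated in full; the proofs are below) =====
def Claim_equal_fill_letter : Prop := ∀ (text : String), Dom_fill_letter text → Spec_fill_letter text (fill_letter text)

-- ===== LEMMAS AND PROOFS =====
lemma loopA_eq_foldl : ∀ (res l : List Char), res.length % 2 = 0 →
    fillLoopA res l = l.foldl stepB res := by
  intro res l
  induction res, l using fillLoopA.induct with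
  | case1 res => intro _; rfl
  | case2 res c =>
    intro hres
    simp [fillLoopA, stepB, hres]
  | case3 res c d rest hcd ih =>
    intro hres
    have hcd' : c = d := by simpa using hcd
    subst hcd'
    have hx : (res ++ [c, 'x']).length % 2 = 0 := by simp [hres]
    have hstep1 : stepB res c = res ++ [c] := by simp [stepB, hres]
    have hstep2 : stepB (res ++ [c]) c = res ++ [c, 'x', c] := by
      simp [stepB]; omega
    have hstep3 : stepB (res ++ [c, 'x']) c = res ++ [c, 'x', c] := by
      simp [stepB, hres]
    rw [show fillLoopA res (c :: c :: rest) = fillLoopA (res ++ [c, 'x']) (c :: rest) from by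
      simp [fillLoopA], ih hx]
    simp [List.foldl, hstep1, hstep2, hstep3]
  | case4 res c d rest hcd ih =>
    intro hres
    have hcd' : ¬ c = d := by simpa using hcd
    have h2 : (res ++ [c, d]).length % 2 = 0 := by simp [hres]
    have hstep1 : stepB res c = res ++ [c] := by simp [stepB, hres]
    have hstep2 : stepB (res ++ [c]) d = res ++ [c, d] := by
      simp [stepB, hcd']
    rw [show fillLoopA res (c :: d :: rest) = fillLoopA (res ++ [c, d]) rest from by
      simp [fillLoopA, hcd'], ih h2]
    simp [List.foldl, hstep1, hstep2]

-- ===== VERDICT (by name: the statement is the Claim_ definition above) =====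
theorem fill_letter_spec : Claim_equal_fill_letter := by
  intro text _
  unfold Spec_fill_letter fill_letter fill_letter_alt
  rw [loopA_eq_foldl [] text.toList rfl]
  rcases Nat.mod_two_eq_zero_or_one (List.foldl stepB [] text.toList).length with h | h <;>
    simp [h]
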